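-- pv_equiv track=rewrite | github.com/Hussainalirazv/CodeMorph | backend/app.py | preprocess_code
-- ===== SOURCE A (Python) =====
-- def preprocess_code(code: str) -> str:
--     lines = code.split('\n')
--     processed_lines = []
--     current_indent = 0
--
--     for line in lines:
--         stripped = line.lstrip()
--         if not stripped:
--             continue
--
--         indent = len(line) - len(stripped)
--         if indent > current_indent:
--             processed_lines.append("INDENT " + stripped)
--             current_indent = indent
--         elif indent < current_indent:
--             processed_lines.append("DEDENT " * ((current_indent - indent) // 4) + stripped)
--             current_indent = indent
--         else:
--             processed_lines.append(stripped)
--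
--     return " NEW_LINE ".join(processed_lines) + " NEW_LINE"
-- ===== SOURCE B (Python) =====
-- def preprocess_code(code: str) -> str:
--     # single character-level scan: no split/lstrip; a small state machine per line
--     pieces = []
--     cur = 0      # indent of the previous non-blank line
--     indent = 0   # leading-whitespace count of the current line
--     body = []    # characters of the current line after its indentation
--     for ch in code + "\n":
--         if ch == "\n":
--             if body:
--                 text = "".join(body)
--                 if indent > cur:
--                     pieces.append("INDENT " + text)
--                 elif indent < cur:
--                     pieces.append("DEDENT " * ((cur - indent) // 4) + text)
--                 else:
--                     pieces.append(text)
--                 cur = indent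
--             indent = 0
--             body = []
--         elif not body and ch.isspace():
--             indent += 1
--         else:
--             body.append(ch)
--     return " NEW_LINE ".join(pieces) + " NEW_LINE"
-- ===== Notes on version B (the rewrite author's own statement) =====
-- stated objective: alternative
-- what changed: Replaces A's split-into-lines + lstrip pipeline by a single character-level state machine over the code (with a sentinel line terminator appended) that counts indentation and collects each line body itself, emitting the token when the line ends.
import Mathlib
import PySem

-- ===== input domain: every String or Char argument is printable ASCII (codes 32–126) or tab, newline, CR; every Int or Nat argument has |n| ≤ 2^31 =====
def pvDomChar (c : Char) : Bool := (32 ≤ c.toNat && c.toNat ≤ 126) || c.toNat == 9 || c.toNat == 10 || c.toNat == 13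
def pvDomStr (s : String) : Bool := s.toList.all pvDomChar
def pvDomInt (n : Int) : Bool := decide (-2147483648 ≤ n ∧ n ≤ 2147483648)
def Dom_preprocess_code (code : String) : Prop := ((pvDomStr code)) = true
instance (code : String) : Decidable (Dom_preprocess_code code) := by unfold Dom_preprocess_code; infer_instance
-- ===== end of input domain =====

-- B replaces A's split('\n')+lstrip line pipeline by a single character-level state machine
-- over code+'\n' that counts indentation and collects line bodies itself (objective: alternative).

-- ===== PORT A =====
-- "DEDENT " * n (Python str * int; negative n gives "")
def pcStrMul (s : String) (n : Int) : String := String.join (List.replicate n.toNat s)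

-- the for-loop of A: state = (processed_lines, current_indent)
def pcLoopA : List String → List String → Int → List String
  | [], acc, _ => acc
  | line :: rest, acc, cur =>
    let stripped := PySem.Str.lstrip line
    if stripped = "" then pcLoopA rest acc cur
    else
      let indent : Int := (PySem.Str.len line : Int) - (PySem.Str.len stripped : Int)
      if indent > cur then pcLoopA rest (acc ++ ["INDENT " ++ stripped]) indent
      else if indent < cur then
        pcLoopA rest (acc ++ [pcStrMul "DEDENT " (PySem.Int.floordiv (cur - indent) 4) ++ stripped]) indent
      else pcLoopA rest (acc ++ [stripped]) cur

def preprocess_code (code : String) : String :=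
  let lines := ((PySem.Str.split? code "\n").getD [])
  let processed_lines := pcLoopA lines [] 0
  PySem.Str.join " NEW_LINE " processed_lines ++ " NEW_LINE"

-- ===== PORT B =====
-- the for-loop of Source B: state = (pieces, cur, indent, body); one char at a time
def pcScanB : List Char → List String → Int → Int → List Char → List String
  | [], pieces, _, _, _ => pieces
  | ch :: rest, pieces, cur, indent, body =>
    if ch = '\n' then
      if body ≠ [] then
        let text := String.ofList body
        let tok :=
          if indent > cur then "INDENT " ++ text
          else if indent < cur then pcStrMul "DEDENT " (PySem.Int.floordiv (cur - indent) 4) ++ text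
          else text
        pcScanB rest (pieces ++ [tok]) indent 0 []
      else pcScanB rest pieces cur 0 []
    else if body = [] ∧ PySem.Chars.isspace ch then
      pcScanB rest pieces cur (indent + 1) body
    else pcScanB rest pieces cur indent (body ++ [ch])

def preprocess_code_alt (code : String) : String :=
  let pieces := pcScanB (code ++ "\n").toList [] 0 0 []
  PySem.Str.join " NEW_LINE " pieces ++ " NEW_LINE"

-- ===== PRECONDITION & SPEC =====
def Spec_preprocess_code (code : String) (out : String) : Prop := out = preprocess_code_alt code
instance (code : String) (out : String) : Decidable (Spec_preprocess_code code out) := by unfold Spec_preprocess_code; infer_instance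

-- ===== CLAIM (what is proved, stated in full; the proofs are below) =====
def Claim_equal_preprocess_code : Prop := ∀ (code : String), Dom_preprocess_code code → Spec_preprocess_code code (preprocess_code code)

-- ===== LEMMAS AND PROOFS =====

-- structural recharacterisation of splitting on '\n' (proof helper only)
def pcSplitNl : List Char → List Char → List (List Char)
  | pre, [] => [pre]
  | pre, c :: rest => if c = '\n' then pre :: pcSplitNl [] rest else pcSplitNl (pre ++ [c]) rest

theorem pcSplitOn_go_eq (fuel : Nat) (cs pre : List Char) (acc : List (List Char))
    (h : cs.length ≤ fuel) :
    PySem.Chars.splitOn.go ['\n'] fuel cs pre acc = acc.reverse ++ pcSplitNl pre.reverse cs := by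
  induction fuel generalizing cs pre acc with
  | zero =>
    have : cs = [] := by cases cs <;> simp_all
    subst this
    simp [PySem.Chars.splitOn.go, pcSplitNl]
  | succ n ih =>
    cases cs with
    | nil => simp [PySem.Chars.splitOn.go, pcSplitNl]
    | cons c rest =>
      simp only [PySem.Chars.splitOn.go]
      by_cases hc : c = '\n'
      · subst hc
        rw [if_pos (by simp [List.isPrefixOf])]
        simp only [List.length_cons, List.drop_succ_cons, List.length_nil, List.drop_zero]
        rw [ih rest [] (pre.reverse :: acc) (by simpa using h)]
        simp [pcSplitNl]
      · rw [if_neg (by simp [List.isPrefixOf, Ne.symm hc])]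
        rw [ih rest (c :: pre) acc (by simpa using Nat.le_of_succ_le_succ (by simpa using h))]
        simp [pcSplitNl, hc]

theorem pcSplitOn_eq (cs : List Char) :
    PySem.Chars.splitOn cs ['\n'] = pcSplitNl [] cs := by
  simpa using pcSplitOn_go_eq (cs.length + 1) cs [] [] (by omega)

theorem pcStripOfList (l : List Char) :
    PySem.Str.lstrip (String.ofList l) = String.ofList (PySem.Chars.lstrip l) := by
  simp [PySem.Str.lstrip]

theorem pcLenOfList (l : List Char) : PySem.Str.len (String.ofList l) = l.length := by
  simp [PySem.Str.len]

theorem pcOfListEmpty (l : List Char) : (String.ofList l = "") ↔ l = [] := by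
  constructor
  · intro h; have := congrArg String.toList h; simpa using this
  · rintro rfl; rfl


theorem pcLstripNil : PySem.Chars.lstrip [] = [] := rfl

theorem pcMain (cs : List Char) (pre : List Char) (pieces : List String) (cur : Int) :
    pcScanB (cs ++ ['\n']) pieces cur
        ((pre.length : Int) - ((PySem.Chars.lstrip pre).length : Int)) (PySem.Chars.lstrip pre)
      = pcLoopA ((pcSplitNl pre cs).map String.ofList) pieces cur := by
  induction cs generalizing pre pieces cur with
  | nil =>
    simp only [List.nil_append, pcScanB, pcSplitNl, List.map, pcLoopA, List.map_nil,
      pcStripOfList, pcLenOfList, pcOfListEmpty, if_pos rfl]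
    by_cases hb : PySem.Chars.lstrip pre = []
    · simp [hb, pcScanB]
    · simp only [if_neg hb, ne_eq, hb, not_false_eq_true, if_pos]
      by_cases h1 : ((pre.length : Int) - ((PySem.Chars.lstrip pre).length : Int)) > cur
      · simp [h1, pcScanB, pcLoopA]
      · by_cases h2 : ((pre.length : Int) - ((PySem.Chars.lstrip pre).length : Int)) < cur
        · simp [h1, h2, pcScanB, pcLoopA]
        · have he : ((pre.length : Int) - ((PySem.Chars.lstrip pre).length : Int)) = cur := by omega
          simp [h1, h2, he, pcScanB, pcLoopA]
  | cons c rest ih =>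
    by_cases hc : c = '\n'
    · subst hc
      simp only [List.cons_append, pcScanB, pcSplitNl, List.map, pcLoopA,
        pcStripOfList, pcLenOfList, pcOfListEmpty, if_pos rfl]
      by_cases hb : PySem.Chars.lstrip pre = []
      · simpa [hb, pcLstripNil, pcLoopA, pcStripOfList, pcOfListEmpty] using ih [] pieces cur
      · simp only [if_neg hb, ne_eq, hb, not_false_eq_true, if_pos]
        by_cases h1 : ((pre.length : Int) - ((PySem.Chars.lstrip pre).length : Int)) > cur
        · simpa [h1, pcLstripNil, pcLoopA, pcStripOfList, pcLenOfList, pcOfListEmpty, hb] using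
            ih [] (pieces ++ ["INDENT " ++ String.ofList (PySem.Chars.lstrip pre)])
              ((pre.length : Int) - ((PySem.Chars.lstrip pre).length : Int))
        · by_cases h2 : ((pre.length : Int) - ((PySem.Chars.lstrip pre).length : Int)) < cur
          · simpa [h1, h2, pcLstripNil, pcLoopA, pcStripOfList, pcLenOfList, pcOfListEmpty, hb] using
              ih [] (pieces ++ [pcStrMul "DEDENT " (PySem.Int.floordiv (cur - ((pre.length : Int) - ((PySem.Chars.lstrip pre).length : Int))) 4) ++ String.ofList (PySem.Chars.lstrip pre)])
                ((pre.length : Int) - ((PySem.Chars.lstrip pre).length : Int))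
          · have he : ((pre.length : Int) - ((PySem.Chars.lstrip pre).length : Int)) = cur := by omega
            simpa [h1, h2, he, pcLstripNil, pcLoopA, pcStripOfList, pcLenOfList, pcOfListEmpty, hb] using
              ih [] (pieces ++ [String.ofList (PySem.Chars.lstrip pre)]) cur
    · simp only [List.cons_append, pcScanB, pcSplitNl, if_neg hc]
      by_cases hsp : PySem.Chars.lstrip pre = [] ∧ PySem.Chars.isspace c = true
      · obtain ⟨hb, hs⟩ := hsp
        rw [if_pos ⟨hb, hs⟩]
        have hb' : PySem.Chars.lstrip (pre ++ [c]) = [] := by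
          unfold PySem.Chars.lstrip at hb ⊢
          rw [List.dropWhile_append, hb]
          simp [List.dropWhile, hs]
        have hthis := ih (pre ++ [c]) pieces cur
        rw [hb'] at hthis
        rw [hb]
        push_cast at hthis ⊢
        simpa using hthis
      · rw [if_neg hsp]
        by_cases hb : PySem.Chars.lstrip pre = []
        · have hs : PySem.Chars.isspace c = false := by
            by_contra h
            exact hsp ⟨hb, by simpa using h⟩
          have hb' : PySem.Chars.lstrip (pre ++ [c]) = [c] := by
            unfold PySem.Chars.lstrip at hb ⊢
            rw [List.dropWhile_append, hb]
            simp [List.dropWhile, hs]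
          have hthis := ih (pre ++ [c]) pieces cur
          rw [hb'] at hthis
          rw [hb]
          push_cast at hthis ⊢
          simpa using hthis
        · have hb' : PySem.Chars.lstrip (pre ++ [c]) = PySem.Chars.lstrip pre ++ [c] := by
            unfold PySem.Chars.lstrip at hb ⊢
            rw [List.dropWhile_append]
            simp [hb]
          have hthis := ih (pre ++ [c]) pieces cur
          rw [hb'] at hthis
          have harith : ((pre ++ [c]).length : Int) - ((PySem.Chars.lstrip pre ++ [c]).length : Int)
              = ((pre.length : Int) - ((PySem.Chars.lstrip pre).length : Int)) := by
            simp only [List.length_append, List.length_cons, List.length_nil]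
            push_cast
            ring
          rw [harith] at hthis
          exact hthis

-- ===== VERDICT (by name: the statement is the Claim_ definition above) =====
theorem preprocess_code_spec : Claim_equal_preprocess_code := by
  intro code _
  unfold Spec_preprocess_code preprocess_code preprocess_code_alt
  have h1 : (PySem.Str.split? code "\n").getD [] = (pcSplitNl [] code.toList).map String.ofList := by
    simp [PySem.Str.split?, PySem.Chars.split?, pcSplitOn_eq]
  have h2 : (code ++ "\n").toList = code.toList ++ ['\n'] := by simp
  have h3 := pcMain code.toList [] [] 0
  simp only [pcLstripNil, List.length_nil, Nat.cast_zero, sub_zero] at h3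
  rw [h1, h2, h3]
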